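-- pv_equiv track=rewrite | github.com/joseigor/consorcio | analyze_optimal_cotas.py | calculate_catchment
-- ===== SOURCE A (Python) =====
-- from typing import List, Tuple, Set, Dict
--
-- def find_selected_cota(initial_draw: int, active_cotas: Set[int],
--                        max_cota: int) -> int:
--     """
--     Simulate selection algorithm: -1, +1, -2, +2, -3, +3...
--     (searches BELOW first, then ABOVE)
--     """
--     if initial_draw in active_cotas:
--         return initial_draw
--
--     for offset in range(1, max_cota):
--         # Try below FIRST (-)
--         below = initial_draw - offset
--         if below >= 1 and below in active_cotas:
--             return below
--
--         # Then try above (+)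
--         above = initial_draw + offset
--         if above <= max_cota and above in active_cotas:
--             return above
--
--     return None
--
-- def calculate_catchment(cota: int, active_cotas: Set[int],
--                         max_cota: int) -> Tuple[int, List[int]]:
--     """
--     Count how many initial draws result in this cota being selected.
--     Returns: (count, list of draws that result in this cota)
--     """
--     if cota not in active_cotas:
--         return 0, []
--
--     draws = []
--     for draw in range(1, max_cota + 1):
--         if find_selected_cota(draw, active_cotas, max_cota) == cota:
--             draws.append(draw)
--
--     return len(draws), draws
-- ===== SOURCE B (Python) =====
-- def calculate_catchment(cota, active_cotas, max_cota):
--     if cota not in active_cotas or not (1 <= cota <= max_cota):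
--         return 0, []
--     lo = max((a for a in active_cotas if 1 <= a < cota), default=None)
--     hi = min((a for a in active_cotas if cota < a <= max_cota), default=None)
--     low = 1 if lo is None else (lo + cota) // 2 + 1
--     high = max_cota if hi is None else (cota + hi) // 2
--     draws = list(range(low, high + 1))
--     return len(draws), draws
-- ===== Notes on version B (the rewrite author's own statement) =====
-- stated objective: faster
-- what changed: Instead of simulating the -1,+1,-2,+2 search for every draw in 1..max_cota (a quadratic double loop), B computes the cota's catchment as one contiguous interval from the midpoints to its nearest active neighbours below and above, and returns that range directly.
import Mathlib
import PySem

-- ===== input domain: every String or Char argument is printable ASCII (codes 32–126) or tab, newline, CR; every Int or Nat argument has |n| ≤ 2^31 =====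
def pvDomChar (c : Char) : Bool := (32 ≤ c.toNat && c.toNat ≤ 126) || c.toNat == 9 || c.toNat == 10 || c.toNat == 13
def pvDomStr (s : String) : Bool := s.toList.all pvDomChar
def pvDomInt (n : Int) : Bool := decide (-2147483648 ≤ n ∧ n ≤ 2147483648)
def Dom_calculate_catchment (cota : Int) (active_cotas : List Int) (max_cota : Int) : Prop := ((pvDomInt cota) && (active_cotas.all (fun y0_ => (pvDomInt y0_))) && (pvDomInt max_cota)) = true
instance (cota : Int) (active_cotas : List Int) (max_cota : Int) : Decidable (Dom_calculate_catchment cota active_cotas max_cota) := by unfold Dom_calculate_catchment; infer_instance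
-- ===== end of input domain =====

-- B replaces A's per-draw simulation of the -1,+1,-2,+2 search by a closed-form catchment
-- interval computed from the midpoints to the nearest active neighbours (objective: faster).

-- ===== PORT A =====
-- the 'for offset in range(1, max_cota)' loop of find_selected_cota, with its early returns
def findSelAux (d : Int) (S : List Int) (M : Int) : List Int → Option Int
  | [] => none
  | o :: rest =>
    if 1 ≤ d - o ∧ (d - o) ∈ S then some (d - o)
    else if d + o ≤ M ∧ (d + o) ∈ S then some (d + o)
    else findSelAux d S M rest

def find_selected_cota (d : Int) (S : List Int) (M : Int) : Option Int :=
  if d ∈ S then some d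
  else findSelAux d S M (PySem.List.pyRange 1 M 1)

def calculate_catchment (cota : Int) (active_cotas : List Int) (max_cota : Int) : Int × List Int :=
  if cota ∉ active_cotas then (0, [])
  else
    let draws := (PySem.List.pyRange 1 (max_cota + 1) 1).foldl
      (fun acc d => if find_selected_cota d active_cotas max_cota = some cota then acc ++ [d] else acc) []
    ((draws.length : Int), draws)

-- ===== PORT B =====
def calculate_catchment_alt (cota : Int) (active_cotas : List Int) (max_cota : Int) : Int × List Int :=
  if cota ∈ active_cotas ∧ 1 ≤ cota ∧ cota ≤ max_cota then
    let lo := PySem.List.max? (active_cotas.filter (fun a => decide (1 ≤ a) && decide (a < cota))) (fun x => x)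
    let hi := PySem.List.min? (active_cotas.filter (fun a => decide (cota < a) && decide (a ≤ max_cota))) (fun x => x)
    let low := match lo with | none => 1 | some l => PySem.Int.floordiv (l + cota) 2 + 1
    let high := match hi with | none => max_cota | some h => PySem.Int.floordiv (cota + h) 2
    let draws := PySem.List.pyRange low (high + 1) 1
    ((draws.length : Int), draws)
  else (0, [])

-- ===== PRECONDITION & SPEC =====
def Spec_calculate_catchment (cota : Int) (active_cotas : List Int) (max_cota : Int) (out : Int × List Int) : Prop := out = calculate_catchment_alt cota active_cotas max_cota
instance (cota : Int) (active_cotas : List Int) (max_cota : Int) (out : Int × List Int) : Decidable (Spec_calculate_catchment cota active_cotas max_cota out) := by unfold Spec_calculate_catchment; infer_instance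

-- ===== CLAIM (what is proved, stated in full; the proofs are below) =====
def Claim_equal_calculate_catchment : Prop := ∀ (cota : Int) (active_cotas : List Int) (max_cota : Int), Dom_calculate_catchment cota active_cotas max_cota → Spec_calculate_catchment cota active_cotas max_cota (calculate_catchment cota active_cotas max_cota)

-- ===== LEMMAS AND PROOFS =====

-- |x - d| as an Int
def idist (d x : Int) : Int := if d ≤ x then x - d else d - x

-- "cota c wins the draw d": every other admissible active cota is strictly farther,
-- or at equal distance but above (the search tries below first)
def Wins (c d : Int) (S : List Int) (M : Int) : Prop :=
  ∀ a ∈ S, 1 ≤ a → a ≤ M → a ≠ c → (idist d c < idist d a ∨ (idist d a = idist d c ∧ c < a))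

lemma findSelAux_bounds (d : Int) (S : List Int) (M : Int) (hd1 : 1 ≤ d) (hd2 : d ≤ M) :
    ∀ L : List Int, (∀ o ∈ L, 1 ≤ o) → ∀ x, findSelAux d S M L = some x → 1 ≤ x ∧ x ≤ M := by
  intro L
  induction L with
  | nil => intro _ x h; simp [findSelAux] at h
  | cons o rest ih =>
    intro hL x h
    have ho : 1 ≤ o := hL o (by simp)
    simp only [findSelAux] at h
    split_ifs at h with h1 h2
    · cases h; omega
    · cases h; omega
    · exact ih (fun o' ho' => hL o' (by simp [ho'])) x h

lemma aux_spec (c d : Int) (S : List Int) (M : Int) (hc : c ∈ S) (hc1 : 1 ≤ c) (hc2 : c ≤ M)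
    (hd1 : 1 ≤ d) (hd2 : d ≤ M) :
    ∀ n : Nat, ∀ k : Int, (M - k).toNat = n → 1 ≤ k →
      (∀ a ∈ S, 1 ≤ a → a ≤ M → k ≤ idist d a) →
      (findSelAux d S M (PySem.List.pyRange k M 1) = some c ↔ Wins c d S M) := by
  intro n
  induction n with
  | zero =>
    intro k hn hk inv
    have hkM : M ≤ k := by omega
    have hcd := inv c hc hc1 hc2
    exfalso
    simp only [idist] at hcd
    split_ifs at hcd <;> omega
  | succ n ih =>
    intro k hn hk inv
    have hkM : k < M := by omega
    rw [PySem.List.pyRange_one_cons hkM]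
    simp only [findSelAux]
    have hic : ∀ a, idist d a = k → a = d - k ∨ a = d + k := by
      intro a h; simp only [idist] at h; split_ifs at h <;> omega
    split_ifs with h1 h2
    · -- below hit: returns d - k
      constructor
      · intro h
        have hc' : c = d - k := by injection h with h; omega
        subst hc'
        intro a ha ha1 haM hac
        have hka := inv a ha ha1 haM
        rcases lt_or_eq_of_le hka with hlt | heq
        · left
          have : idist d (d - k) = k := by simp only [idist]; split_ifs <;> omega
          omega
        · rcases hic a heq.symm with h' | h'
          · exact absurd h' (by omega)
          · right
            refine ⟨by simp only [idist]; split_ifs <;> omega, by omega⟩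
      · intro hw
        by_contra hne
        have hne' : d - k ≠ c := by intro h; exact hne (by rw [h])
        have := hw (d - k) h1.2 h1.1 (by omega) hne'
        have hkc := inv c hc hc1 hc2
        have hdk : idist d (d - k) = k := by simp only [idist]; split_ifs <;> omega
        rcases this with h' | ⟨heq, hlt⟩
        · omega
        · rcases hic c (by omega) with h' | h' <;> omega
    · -- above hit: returns d + k
      constructor
      · intro h
        have hc' : c = d + k := by injection h with h; omega
        subst hc'
        intro a ha ha1 haM hac
        have hka := inv a ha ha1 haM
        rcases lt_or_eq_of_le hka with hlt | heq
        · left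
          have : idist d (d + k) = k := by simp only [idist]; split_ifs <;> omega
          omega
        · rcases hic a heq.symm with h' | h'
          · exfalso; exact h1 ⟨by omega, by rw [← h']; exact ha⟩
          · exact absurd h' (by omega)
      · intro hw
        by_contra hne
        have hne' : d + k ≠ c := by intro h; exact hne (by rw [h])
        have := hw (d + k) h2.2 (by omega) h2.1 hne'
        have hkc := inv c hc hc1 hc2
        have hdk : idist d (d + k) = k := by simp only [idist]; split_ifs <;> omega
        rcases this with h' | ⟨heq, hlt⟩
        · omega
        · rcases hic c (by omega) with h' | h'
          · exact h1 ⟨by omega, by rw [← h']; exact hc⟩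
          · omega
    · -- no hit at offset k
      apply ih (k + 1) (by omega) (by omega)
      intro a ha ha1 haM
      have := inv a ha ha1 haM
      rcases lt_or_eq_of_le this with h | h
      · omega
      · exfalso
        rcases hic a h.symm with h' | h'
        · exact h1 ⟨by omega, by rw [← h']; exact ha⟩
        · exact h2 ⟨by omega, by rw [← h']; exact ha⟩

lemma find_spec (c d : Int) (S : List Int) (M : Int) (hc : c ∈ S) (hc1 : 1 ≤ c) (hc2 : c ≤ M)
    (hd1 : 1 ≤ d) (hd2 : d ≤ M) :
    (find_selected_cota d S M = some c ↔ Wins c d S M) := by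
  unfold find_selected_cota
  split_ifs with hdS
  · constructor
    · intro h
      have hc' : c = d := by injection h with h; omega
      subst hc'
      intro a ha ha1 haM hac
      left
      simp only [idist]; split_ifs <;> omega
    · intro hw
      by_contra hne
      have hne' : d ≠ c := by intro h; exact hne (by rw [h])
      have := hw d hdS hd1 hd2 hne'
      have h0 : idist d d = 0 := by simp [idist]
      have h1 : 0 ≤ idist d c := by simp only [idist]; split_ifs <;> omega
      have h2 : idist d c = 0 → c = d := by simp only [idist]; split_ifs <;> omega
      rcases this with h' | ⟨heq, _⟩ <;> omega
  · apply aux_spec c d S M hc hc1 hc2 hd1 hd2 (M - 1).toNat 1 (by omega) (by omega)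
    intro a ha ha1 haM
    have : idist d a = 0 → a = d := by simp only [idist]; split_ifs <;> omega
    have : a ≠ d := by intro h; exact hdS (h ▸ ha)
    simp only [idist]; split_ifs <;> omega

lemma filter_pyRange_interval (p : Int → Bool) (b h : Int) :
    ∀ n : Nat, ∀ a l : Int, (b - a).toNat = n → a ≤ l → h < b →
      (∀ d, a ≤ d → d < b → (p d = true ↔ l ≤ d ∧ d ≤ h)) →
      (PySem.List.pyRange a b 1).filter p = PySem.List.pyRange l (h + 1) 1 := by
  intro n
  induction n with
  | zero =>
    intro a l hn hal hhb hp
    rw [PySem.List.pyRange_one_eq_nil (show b ≤ a by omega),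
      PySem.List.pyRange_one_eq_nil (show h + 1 ≤ l by omega)]
    simp
  | succ n ih =>
    intro a l hn hal hhb hp
    have hab : a < b := by omega
    by_cases hlh : l ≤ h
    · rw [PySem.List.pyRange_one_cons hab]
      by_cases heq : a = l
      · subst heq
        have hpa : p a = true := (hp a le_rfl hab).mpr ⟨le_rfl, hlh⟩
        rw [List.filter_cons_of_pos hpa]
        conv_rhs => rw [PySem.List.pyRange_one_cons (show a < h + 1 by omega)]
        congr 1
        apply ih (a + 1) (a + 1) (by omega) le_rfl hhb
        intro d hd1 hd2
        rw [hp d (by omega) hd2]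
        omega
      · have hpa : p a = false := by
          by_contra h'
          have := (hp a le_rfl hab).mp (by revert h'; cases p a <;> simp)
          omega
        rw [List.filter_cons_of_neg (by simp [hpa])]
        exact ih (a + 1) l (by omega) (by omega) hhb (fun d hd1 hd2 => hp d (by omega) hd2)
    · rw [PySem.List.pyRange_one_eq_nil (show h + 1 ≤ l by omega)]
      rw [List.filter_eq_nil_iff]
      intro d hd
      rw [PySem.List.mem_pyRange_one] at hd
      intro h'
      have := (hp d hd.1 hd.2).mp h'
      omega

lemma neg_mem_filter_lower {S : List Int} {c a : Int}
    (h : (S.filter (fun a => decide (1 ≤ a) && decide (a < c))) = [])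
    (ha : a ∈ S) (h1 : 1 ≤ a) (h2 : a < c) : False := by
  have : a ∈ S.filter (fun a => decide (1 ≤ a) && decide (a < c)) := by
    simp [List.mem_filter, ha, h1, h2]
  rw [h] at this; simp at this

lemma neg_mem_filter_upper {S : List Int} {c M a : Int}
    (h : (S.filter (fun a => decide (c < a) && decide (a ≤ M))) = [])
    (ha : a ∈ S) (h1 : c < a) (h2 : a ≤ M) : False := by
  have : a ∈ S.filter (fun a => decide (c < a) && decide (a ≤ M)) := by
    simp [List.mem_filter, ha, h1, h2]
  rw [h] at this; simp at this

-- the interval characterisation: Wins c d ↔ low ≤ d ≤ high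
lemma wins_iff_interval (c : Int) (S : List Int) (M : Int) (hc : c ∈ S) (hc1 : 1 ≤ c) (hc2 : c ≤ M)
    (d : Int) (hd1 : 1 ≤ d) (hd2 : d ≤ M) :
    (Wins c d S M ↔
      (match PySem.List.max? (S.filter (fun a => decide (1 ≤ a) && decide (a < c))) (fun x => x) with
        | none => 1 | some l => PySem.Int.floordiv (l + c) 2 + 1) ≤ d ∧
      d ≤ (match PySem.List.min? (S.filter (fun a => decide (c < a) && decide (a ≤ M))) (fun x => x) with
        | none => M | some h => PySem.Int.floordiv (c + h) 2)) := by
  constructor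
  · intro hw
    constructor
    · cases hmax : PySem.List.max? (S.filter (fun a => decide (1 ≤ a) && decide (a < c))) (fun x => x) with
      | none => exact hd1
      | some l =>
        have hlmem := PySem.List.max?_mem hmax
        rw [List.mem_filter] at hlmem
        obtain ⟨hlS, hl'⟩ := hlmem
        simp only [Bool.and_eq_true, decide_eq_true_eq] at hl'
        obtain ⟨hl1, hl2⟩ := hl'
        have := hw l hlS hl1 (by omega) (by omega)
        have hlow : PySem.Int.floordiv (l + c) 2 + 1 ≤ d ↔ l + c < d * 2 := by
          rw [show (PySem.Int.floordiv (l + c) 2 + 1 ≤ d) ↔ (PySem.Int.floordiv (l + c) 2 < d) by omega,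
            PySem.Int.floordiv_lt_iff_lt_mul (show (0:Int) < 2 by norm_num)]
        rw [hlow]
        by_contra hcon
        simp only [idist] at this
        split_ifs at this <;> rcases this with h' | ⟨h', h''⟩ <;> omega
    · cases hmin : PySem.List.min? (S.filter (fun a => decide (c < a) && decide (a ≤ M))) (fun x => x) with
      | none => exact hd2
      | some h =>
        have hhmem := PySem.List.min?_mem hmin
        rw [List.mem_filter] at hhmem
        obtain ⟨hhS, hh'⟩ := hhmem
        simp only [Bool.and_eq_true, decide_eq_true_eq] at hh'
        obtain ⟨hh1, hh2⟩ := hh'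
        have := hw h hhS (by omega) hh2 (by omega)
        rw [PySem.Int.le_floordiv_iff_mul_le (show (0:Int) < 2 by norm_num)]
        by_contra hcon
        simp only [idist] at this
        split_ifs at this <;> rcases this with h' | ⟨h', h''⟩ <;> omega
  · intro ⟨hlo, hhi⟩
    intro a ha ha1 haM hac
    rcases lt_trichotomy a c with hlt | heq | hgt
    · -- a below c: a ≤ lo, and d is above the lo/c midpoint
      cases hmax : PySem.List.max? (S.filter (fun a => decide (1 ≤ a) && decide (a < c))) (fun x => x) with
      | none =>
        exfalso
        exact neg_mem_filter_lower (((PySem.List.max?_eq_none_iff _ _).mp hmax)) ha ha1 hlt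
      | some l =>
        have hal : a ≤ l := by
          have := PySem.List.max?_isMax hmax a (by simp [List.mem_filter, ha, ha1, hlt])
          simpa using this
        rw [hmax] at hlo
        have hlo' : PySem.Int.floordiv (l + c) 2 + 1 ≤ d := hlo
        have hlow : l + c < d * 2 := by
          have : PySem.Int.floordiv (l + c) 2 < d := by omega
          rwa [PySem.Int.floordiv_lt_iff_lt_mul (show (0:Int) < 2 by norm_num)] at this
        left
        simp only [idist]; split_ifs <;> omega
    · exact absurd heq hac
    · -- a above c: hi ≤ a, and d is at or below the c/hi midpoint
      cases hmin : PySem.List.min? (S.filter (fun a => decide (c < a) && decide (a ≤ M))) (fun x => x) with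
      | none =>
        exfalso
        exact neg_mem_filter_upper (((PySem.List.min?_eq_none_iff _ _).mp hmin)) ha hgt haM
      | some h =>
        have hha : h ≤ a := by
          have := PySem.List.min?_isMin hmin a (by simp [List.mem_filter, ha, hgt, haM])
          simpa using this
        rw [hmin] at hhi
        have hhi' : d ≤ PySem.Int.floordiv (c + h) 2 := hhi
        have hhigh : d * 2 ≤ c + h := by
          rwa [PySem.Int.le_floordiv_iff_mul_le (show (0:Int) < 2 by norm_num)] at hhi'
        by_cases heqd : idist d a = idist d c
        · exact Or.inr ⟨heqd, hgt⟩
        · left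
          have : idist d c ≤ idist d a := by
            simp only [idist]; split_ifs <;> omega
          simp only [idist] at heqd this ⊢
          omega

-- ===== VERDICT (by name: the statement is the Claim_ definition above) =====
theorem calculate_catchment_spec : Claim_equal_calculate_catchment := by
  intro c S M _dom
  unfold Spec_calculate_catchment calculate_catchment calculate_catchment_alt
  by_cases hc : c ∈ S
  · simp only [hc, not_true_eq_false, if_false, true_and]
    by_cases hcb : 1 ≤ c ∧ c ≤ M
    · -- main case: rewrite A's loop as a filter, then identify the filter with B's range
      rw [if_pos hcb]
      obtain ⟨hc1, hc2⟩ := hcb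
      rw [PySem.List.foldl_append_ite_eq_filter, List.nil_append]
      have hiff : ∀ d, 1 ≤ d → d < M + 1 →
          (decide (find_selected_cota d S M = some c) = true ↔
            (match PySem.List.max? (S.filter (fun a => decide (1 ≤ a) && decide (a < c))) (fun x => x) with
              | none => 1 | some l => PySem.Int.floordiv (l + c) 2 + 1) ≤ d ∧
            d ≤ (match PySem.List.min? (S.filter (fun a => decide (c < a) && decide (a ≤ M))) (fun x => x) with
              | none => M | some h => PySem.Int.floordiv (c + h) 2)) := by
        intro d hd1 hd2
        rw [decide_eq_true_eq, find_spec c d S M hc hc1 hc2 hd1 (by omega)]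
        exact wins_iff_interval c S M hc hc1 hc2 d hd1 (by omega)
      have hlowb : 1 ≤ (match PySem.List.max? (S.filter (fun a => decide (1 ≤ a) && decide (a < c))) (fun x => x) with
          | none => 1 | some l => PySem.Int.floordiv (l + c) 2 + 1) := by
        cases hmax : PySem.List.max? (S.filter (fun a => decide (1 ≤ a) && decide (a < c))) (fun x => x) with
        | none => simp
        | some l =>
          have hlmem := PySem.List.max?_mem hmax
          rw [List.mem_filter] at hlmem
          obtain ⟨hlS, hl'⟩ := hlmem
          simp only [Bool.and_eq_true, decide_eq_true_eq] at hl'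
          show 1 ≤ PySem.Int.floordiv (l + c) 2 + 1
          have : 1 ≤ PySem.Int.floordiv (l + c) 2 := by
            rw [PySem.Int.le_floordiv_iff_mul_le (show (0:Int) < 2 by norm_num)]; omega
          omega
      have hhighb : (match PySem.List.min? (S.filter (fun a => decide (c < a) && decide (a ≤ M))) (fun x => x) with
          | none => M | some h => PySem.Int.floordiv (c + h) 2) < M + 1 := by
        cases hmin : PySem.List.min? (S.filter (fun a => decide (c < a) && decide (a ≤ M))) (fun x => x) with
        | none => simp
        | some h =>
          have hhmem := PySem.List.min?_mem hmin
          rw [List.mem_filter] at hhmem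
          obtain ⟨hhS, hh'⟩ := hhmem
          simp only [Bool.and_eq_true, decide_eq_true_eq] at hh'
          show PySem.Int.floordiv (c + h) 2 < M + 1
          rw [PySem.Int.floordiv_lt_iff_lt_mul (show (0:Int) < 2 by norm_num)]
          omega
      rw [filter_pyRange_interval _ (M + 1) _ (M + 1 - 1).toNat 1 _ rfl hlowb hhighb hiff]
    · -- c active but outside [1, max_cota]: no draw selects it
      rw [if_neg hcb]
      rw [PySem.List.foldl_append_ite_eq_filter, List.nil_append]
      have hnil : (PySem.List.pyRange 1 (M + 1)).filter
          (fun d => decide (find_selected_cota d S M = some c)) = [] := by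
        rw [List.filter_eq_nil_iff]
        intro d hd
        rw [PySem.List.mem_pyRange_one] at hd
        rw [decide_eq_true_eq]
        intro hfind
        unfold find_selected_cota at hfind
        split_ifs at hfind with hdS
        · have : c = d := by injection hfind with h; omega
          omega
        · have := findSelAux_bounds d S M hd.1 (by omega)
            (PySem.List.pyRange 1 M)
            (fun o ho => (PySem.List.mem_pyRange_one.mp ho).1) c hfind
          omega
      rw [hnil]
      rfl
  · simp [hc]
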